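-- pv_equiv track=rewrite | github.com/pypi-data/pypi-mirror-400 | packages/vibeship-mind/vibeship_mind-5.0.0.tar.gz/vibeship_mind-5.0.0/src/mind/core/federation/extractor.py | _abstract_strategy
-- ===== SOURCE A (Python) =====
-- from collections import defaultdict
--
-- def _abstract_strategy(memory_categories: list[str]) -> str:
--     """Create abstract strategy description from categories.
--
--     This ensures no PII leaks into the strategy description.
--     """
--     if not memory_categories:
--         return "general_context"
--
--     # Group by category type
--     category_groups = defaultdict(int)
--     for cat in memory_categories:
--         category_groups[cat] += 1
--
--     # Build description
--     parts = []
--     for cat, count in sorted(category_groups.items()):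
--         if count > 1:
--             parts.append(f"{cat}({count})")
--         else:
--             parts.append(cat)
--
--     return "+".join(parts)
-- ===== SOURCE B (Python) =====
-- def _part(cat, count):
--     return f"{cat}({count})" if count > 1 else cat
--
--
-- def _abstract_strategy(memory_categories: list[str]) -> str:
--     if not memory_categories:
--         return "general_context"
--     cats = sorted(memory_categories)
--     parts = []
--     i, n = 0, len(cats)
--     while i < n:
--         j = i + 1
--         while j < n and cats[j] == cats[i]:
--             j += 1
--         parts.append(_part(cats[i], j - i))
--         i = j
--     return "+".join(parts)
-- ===== Notes on version B (the rewrite author's own statement) =====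
-- stated objective: alternative
-- what changed: Replaced the defaultdict histogram plus sorted(items) pass by sorting the input list once and emitting one part per consecutive run of equal categories (sort-then-group), with the same empty-list guard and count formatting.
import Mathlib
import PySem

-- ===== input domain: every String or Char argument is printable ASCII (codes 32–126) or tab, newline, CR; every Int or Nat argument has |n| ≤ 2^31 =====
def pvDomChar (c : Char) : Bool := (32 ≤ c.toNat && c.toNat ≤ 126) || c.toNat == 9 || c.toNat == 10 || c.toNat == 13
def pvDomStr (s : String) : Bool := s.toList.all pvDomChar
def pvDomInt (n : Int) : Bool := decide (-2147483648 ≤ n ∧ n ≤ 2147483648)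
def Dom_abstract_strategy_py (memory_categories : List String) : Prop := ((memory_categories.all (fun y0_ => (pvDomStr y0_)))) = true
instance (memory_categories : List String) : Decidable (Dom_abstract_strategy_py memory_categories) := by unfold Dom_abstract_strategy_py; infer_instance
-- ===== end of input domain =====

-- ===== PORT A =====
-- B re-implements A by sort-then-group-consecutive-runs instead of a dict histogram; return values proved equal on all inputs.
def abstract_strategy_py (memory_categories : List String) : String :=
  if memory_categories = [] then "general_context"
  else
    let category_groups : PySem.Dict String Int :=
      memory_categories.foldl (fun d cat => d.modify cat 0 (· + 1)) PySem.Dict.empty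
    let parts : List String :=
      (PySem.List.sorted2 category_groups.items Prod.fst Prod.snd).foldl
        (fun parts pc =>
          parts ++ [if pc.2 > 1 then pc.1 ++ "(" ++ PySem.Int.toStr pc.2 ++ ")" else pc.1]) []
    PySem.Str.join "+" parts

-- ===== PORT B =====
-- port of Source B's helper _part
def pvPart (cat : String) (count : Int) : String :=
  if count > 1 then cat ++ "(" ++ PySem.Int.toStr count ++ ")" else cat

-- the outer while loop of Source B: emit one part per consecutive run of equal categories;
-- the inner `while j < n and cats[j] == cats[i]` scan is the takeWhile/dropWhile split of the tail
def pvRuns : List String → List String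
  | [] => []
  | c :: rest =>
    let j := (rest.takeWhile (· == c)).length
    pvPart c ((j : Int) + 1) :: pvRuns (rest.dropWhile (· == c))
termination_by ys => ys.length
decreasing_by simpa [Nat.lt_succ_iff] using List.length_dropWhile_le (· == c) rest

def abstract_strategy_py_alt (memory_categories : List String) : String :=
  if memory_categories = [] then "general_context"
  else PySem.Str.join "+" (pvRuns (PySem.List.sorted memory_categories (fun x => x)))

-- ===== PRECONDITION & SPEC =====
def Spec_abstract_strategy_py (memory_categories : List String) (out : String) : Prop := out = abstract_strategy_py_alt memory_categories
instance (memory_categories : List String) (out : String) : Decidable (Spec_abstract_strategy_py memory_categories out) := by unfold Spec_abstract_strategy_py; infer_instance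

-- ===== CLAIM (what is proved, stated in full; the proofs are below) =====
def Claim_equal_abstract_strategy_py : Prop := ∀ (memory_categories : List String), Dom_abstract_strategy_py memory_categories → Spec_abstract_strategy_py memory_categories (abstract_strategy_py memory_categories)

-- ===== LEMMAS AND PROOFS =====

-- proof-only helper: the distinct categories, in run order
def pvKeys : List String → List String
  | [] => []
  | c :: rest => c :: pvKeys (rest.dropWhile (· == c))
termination_by ys => ys.length
decreasing_by simpa [Nat.lt_succ_iff] using List.length_dropWhile_le (· == c) rest

lemma pvKeys_subset (ys : List String) : pvKeys ys ⊆ ys := by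
  induction ys using pvKeys.induct with
  | case1 => simp [pvKeys]
  | case2 c rest ih =>
    rw [pvKeys]
    intro a ha
    rcases List.mem_cons.mp ha with h | h
    · simp [h]
    · exact List.mem_cons_of_mem _ ((List.dropWhile_sublist (l := rest) (· == c)).subset (ih h))

lemma drop_lt_head (c : String) (rest : List String)
    (h : (c :: rest).Pairwise (· ≤ ·)) :
    ∀ e ∈ rest.dropWhile (· == c), c < e := by
  rcases List.pairwise_cons.mp h with ⟨hc, hrest⟩
  intro e he
  cases hd : rest.dropWhile (· == c) with
  | nil => simp [hd] at he
  | cons d0 d' =>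
    have hd0mem : d0 ∈ rest := (List.dropWhile_sublist (l := rest) (· == c)).subset (by simp [hd])
    have hne : ¬ ((d0 == c) = true) := by
      have := List.head_dropWhile_not (· == c) (l := rest) (by simp [hd])
      simpa [hd] using this
    have hd0 : c < d0 := lt_of_le_of_ne (hc d0 hd0mem) (fun hcd => hne (by simp [hcd.symm]))
    have hdp : (d0 :: d').Pairwise (· ≤ ·) := hd ▸ hrest.sublist (List.dropWhile_sublist _)
    rw [hd] at he
    rcases List.mem_cons.mp he with rfl | he'
    · exact hd0
    · exact lt_of_lt_of_le hd0 ((List.pairwise_cons.mp hdp).1 e he')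

lemma count_head (c : String) (rest : List String)
    (h : (c :: rest).Pairwise (· ≤ ·)) :
    (c :: rest).count c = (rest.takeWhile (· == c)).length + 1 := by
  have hsplit : rest.takeWhile (· == c) ++ rest.dropWhile (· == c) = rest :=
    List.takeWhile_append_dropWhile
  have ht : (rest.takeWhile (· == c)).count c = (rest.takeWhile (· == c)).length :=
    List.count_eq_length.mpr (fun b hb => by
      have hb2 : b = c := by simpa using List.mem_takeWhile_imp hb
      exact hb2.symm)
  have hdz : (rest.dropWhile (· == c)).count c = 0 :=
    List.count_eq_zero.mpr (fun hmem => lt_irrefl c (drop_lt_head c rest h c hmem))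
  calc (c :: rest).count c = rest.count c + 1 := List.count_cons_self
    _ = ((rest.takeWhile (· == c)) ++ (rest.dropWhile (· == c))).count c + 1 := by rw [hsplit]
    _ = (rest.takeWhile (· == c)).length + 1 := by
          rw [List.count_append, ht, hdz]

lemma count_tail (c : String) (rest : List String) (k : String)
    (h : (c :: rest).Pairwise (· ≤ ·)) (hk : k ∈ rest.dropWhile (· == c)) :
    (c :: rest).count k = (rest.dropWhile (· == c)).count k := by
  have hck : c < k := drop_lt_head c rest h k hk
  have hkc : k ≠ c := fun e => lt_irrefl c (e ▸ hck)
  have hsplit : rest.takeWhile (· == c) ++ rest.dropWhile (· == c) = rest :=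
    List.takeWhile_append_dropWhile
  have htz : (rest.takeWhile (· == c)).count k = 0 :=
    List.count_eq_zero.mpr (fun hmem => by
      have hb2 : k = c := by simpa using List.mem_takeWhile_imp hmem
      exact hkc hb2)
  calc (c :: rest).count k = rest.count k := by simp [Ne.symm hkc]
    _ = ((rest.takeWhile (· == c)) ++ (rest.dropWhile (· == c))).count k := by rw [hsplit]
    _ = (rest.dropWhile (· == c)).count k := by rw [List.count_append, htz, Nat.zero_add]

lemma pvRuns_eq (ys : List String) (h : ys.Pairwise (· ≤ ·)) :
    pvRuns ys = (pvKeys ys).map (fun k => pvPart k (ys.count k)) := by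
  induction ys using pvRuns.induct with
  | case1 => simp [pvRuns, pvKeys]
  | case2 c rest ih =>
    have hrest : (rest.dropWhile (· == c)).Pairwise (· ≤ ·) :=
      (List.pairwise_cons.mp h).2.sublist (List.dropWhile_sublist _)
    rw [pvRuns, pvKeys, List.map_cons]
    congr 1
    · have := count_head c rest h
      congr 1
      rw [this]
      push_cast
      ring
    · rw [ih hrest]
      refine List.map_congr_left (fun k hkmem => ?_)
      rw [count_tail c rest k h (pvKeys_subset _ hkmem)]

lemma pvKeys_pairwise_lt (ys : List String) (h : ys.Pairwise (· ≤ ·)) :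
    (pvKeys ys).Pairwise (· < ·) := by
  induction ys using pvKeys.induct with
  | case1 => simp [pvKeys]
  | case2 c rest ih =>
    rw [pvKeys]
    refine List.pairwise_cons.mpr ⟨fun a ha => ?_, ih ?_⟩
    · exact drop_lt_head c rest h a (pvKeys_subset _ ha)
    · exact (List.pairwise_cons.mp h).2.sublist (List.dropWhile_sublist _)

lemma mem_pvKeys (ys : List String) (h : ys.Pairwise (· ≤ ·)) (a : String) :
    a ∈ pvKeys ys ↔ a ∈ ys := by
  induction ys using pvKeys.induct with
  | case1 => simp [pvKeys]
  | case2 c rest ih =>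
    have hrest : (rest.dropWhile (· == c)).Pairwise (· ≤ ·) :=
      (List.pairwise_cons.mp h).2.sublist (List.dropWhile_sublist _)
    rw [pvKeys]
    constructor
    · intro ha
      rcases List.mem_cons.mp ha with rfl | ha'
      · exact List.mem_cons_self
      · exact List.mem_cons_of_mem _
          ((List.dropWhile_sublist (l := rest) (· == c)).subset ((ih hrest).mp ha'))
    · intro ha
      rcases List.mem_cons.mp ha with rfl | ha'
      · exact List.mem_cons_self
      · have : a ∈ rest.takeWhile (· == c) ++ rest.dropWhile (· == c) := by
          rw [List.takeWhile_append_dropWhile]; exact ha'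
        rcases List.mem_append.mp this with ht | hd
        · have hb2 : a = c := by simpa using List.mem_takeWhile_imp ht
          simp [hb2]
        · exact List.mem_cons_of_mem _ ((ih hrest).mpr hd)

lemma insertBy_congr {α : Type} (f g : α → α → Bool) (x : α) (acc : List α)
    (h : ∀ y ∈ acc, f x y = g x y) :
    PySem.List.insertBy f x acc = PySem.List.insertBy g x acc := by
  induction acc with
  | nil => rfl
  | cons y ys ih =>
    rw [PySem.List.insertBy, PySem.List.insertBy]
    rw [h y List.mem_cons_self]
    split
    · rfl
    · rw [ih (fun z hz => h z (List.mem_cons_of_mem _ hz))]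

lemma foldl_insertBy_fst (l : List (String × Int)) :
    ∀ acc : List (String × Int),
    (∀ x ∈ l, ∀ y ∈ acc, x.1 ≠ y.1) → l.Pairwise (fun a b => a.1 ≠ b.1) →
    l.foldl (fun a x => PySem.List.insertBy
        (fun a b => decide (a.1 < b.1) || (!decide (b.1 < a.1) && decide (a.2 < b.2))) x a) acc
  = l.foldl (fun a x => PySem.List.insertBy (fun a b => decide (a.1 < b.1)) x a) acc := by
  induction l with
  | nil => intro acc _ _; rfl
  | cons x rest ih =>
    intro acc hla hl
    have hx : ∀ y ∈ acc,
        (decide (x.1 < y.1) || (!decide (y.1 < x.1) && decide (x.2 < y.2)))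
          = decide (x.1 < y.1) := by
      intro y hy
      have hne := hla x List.mem_cons_self y hy
      rcases lt_trichotomy x.1 y.1 with hlt | heq | hgt
      · simp [hlt, not_lt_of_gt hlt]
      · exact absurd heq hne
      · simp [hgt, not_lt_of_gt hgt]
    simp only [List.foldl_cons]
    rw [insertBy_congr _ (fun a b => decide (a.1 < b.1)) x acc hx]
    refine ih _ (fun z hz y hy => ?_) (List.pairwise_cons.mp hl).2
    rcases (PySem.List.mem_insertBy _ x y acc).mp hy with rfl | hy'
    · exact ((List.pairwise_cons.mp hl).1 z hz).symm
    · exact hla z (List.mem_cons_of_mem _ hz) y hy'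

lemma sorted2_fst (l : List (String × Int)) (h : l.Pairwise (fun a b => a.1 ≠ b.1)) :
    PySem.List.sorted2 l Prod.fst Prod.snd = PySem.List.sorted l Prod.fst := by
  simp only [PySem.List.sorted2, PySem.List.sorted]
  exact foldl_insertBy_fst l [] (by simp) h

-- ===== VERDICT (by name: the statement is the Claim_ definition above) =====
theorem abstract_strategy_py_spec : Claim_equal_abstract_strategy_py := by
  intro xs _
  unfold Spec_abstract_strategy_py abstract_strategy_py abstract_strategy_py_alt
  by_cases hnil : xs = []
  · simp [hnil]
  · simp only [if_neg hnil]
    set ys := PySem.List.sorted xs (fun x => x) with hys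
    have hsorted : ys.Pairwise (· ≤ ·) := by
      simpa using PySem.List.sorted_pairwise xs (fun x => x)
    have hperm : ys.Perm xs := PySem.List.sorted_perm xs (fun x => x) false
    set ks := pvKeys ys with hks
    have hkslt : ks.Pairwise (· < ·) := pvKeys_pairwise_lt ys hsorted
    have hksnodup : ks.Nodup := hkslt.imp ne_of_lt
    -- the histogram loop is Counter
    have hcounter : xs.foldl (fun d cat => d.modify cat 0 (· + 1)) PySem.Dict.empty
        = PySem.Dict.counter xs := (PySem.Dict.counter_eq_foldl xs).symm
    rw [hcounter, PySem.List.foldl_append_singleton_eq_map, List.nil_append]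
    -- sorted2 over the items = ks paired with counts
    have hitems := PySem.Dict.items_counter xs
    have hitems_ne : (PySem.Dict.counter xs).items.Pairwise (fun a b => a.1 ≠ b.1) := by
      rw [hitems]
      exact List.pairwise_map.mpr (PySem.Set.nodup_ofList xs)
    have hpermks : ks.Perm (PySem.Set.ofList xs) := by
      refine (List.perm_ext_iff_of_nodup hksnodup (PySem.Set.nodup_ofList xs)).mpr (fun a => ?_)
      rw [PySem.Set.mem_ofList, mem_pvKeys ys hsorted a, hperm.mem_iff]
    have hsort2 : PySem.List.sorted2 (PySem.Dict.counter xs).items Prod.fst Prod.snd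
        = ks.map (fun k => (k, (xs.count k : Int))) := by
      rw [sorted2_fst _ hitems_ne, hitems]
      refine PySem.List.sorted_eq_of_perm_of_pairwise_lt _ _ _ ?_ ?_
      · exact hpermks.map _
      · exact List.pairwise_map.mpr hkslt
    rw [hsort2, List.map_map]
    rw [pvRuns_eq ys hsorted]
    refine congrArg _ (List.map_congr_left (fun k hk => ?_)) |>.symm
    show pvPart k ((ys.count k : Int)) = pvPart k ((xs.count k : Int))
    rw [hperm.count_eq]
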